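-- pv_equiv track=rewrite | github.com/penguin138/python_tasks | home_work_4/task_d.py | tokenize
-- ===== SOURCE A (Python) =====
-- def tokenize(str):
--     tokens = []
--     current_token = ""
--     for symbol in str:
--         if symbol.isdigit() and (current_token.isdigit() or current_token == ""):
--             current_token += symbol
--         elif symbol.isalpha() and (current_token.isalpha() or current_token == ""):
--             current_token += symbol
--         elif not symbol.isalpha() and not symbol.isdigit():
--             if current_token != "":
--                 tokens.append(current_token)
--             tokens.append(symbol)
--             current_token = ""
--         else:
--             tokens.append(current_token)
--             current_token = symbol
--     if current_token != "":
--         tokens.append(current_token)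
--     return tokens
-- ===== SOURCE B (Python) =====
-- def _kind(c):
--     if c.isdigit():
--         return 1
--     if c.isalpha():
--         return 2
--     return 0
--
--
-- def tokenize(str):
--     # Two-pointer run scanner: find the end of each maximal digit/letter run
--     # with an inner index loop and emit the slice in one piece; non-alnum
--     # characters are emitted alone.  O(n), no growing-token re-scans.
--     tokens = []
--     n = len(str)
--     i = 0
--     while i < n:
--         k = _kind(str[i])
--         if k == 0:
--             tokens.append(str[i])
--             i += 1
--         else:
--             j = i + 1
--             while j < n and _kind(str[j]) == k:
--                 j += 1
--             tokens.append(str[i:j])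
--             i = j
--     return tokens
-- ===== Notes on version B (the rewrite author's own statement) =====
-- stated objective: faster
-- what changed: B is a two-pointer run scanner: it advances an index to the end of each maximal digit or letter run and emits the slice in one piece, instead of A's per-character state machine that re-scans and re-concatenates the growing token string at every character.
import Mathlib
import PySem

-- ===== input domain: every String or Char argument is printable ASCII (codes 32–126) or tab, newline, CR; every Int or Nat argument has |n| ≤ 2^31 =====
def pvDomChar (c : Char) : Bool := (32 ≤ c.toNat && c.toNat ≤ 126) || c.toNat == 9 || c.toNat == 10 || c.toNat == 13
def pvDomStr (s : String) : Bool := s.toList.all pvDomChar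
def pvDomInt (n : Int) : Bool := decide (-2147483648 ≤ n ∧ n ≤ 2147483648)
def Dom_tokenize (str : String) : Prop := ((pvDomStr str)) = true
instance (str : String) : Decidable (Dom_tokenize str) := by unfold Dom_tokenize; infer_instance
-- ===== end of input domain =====

-- B replaces A's per-character state machine (which re-scans the growing token with
-- .isdigit()/.isalpha() each step) by a two-pointer run scanner emitting whole slices: O(n) vs O(n^2).

-- ===== PORT A =====
-- one iteration of A's for-loop; state = (tokens, current_token as List Char)
def tokAStep (st : List String × List Char) (c : Char) : List String × List Char :=
  if PySem.Chars.isdigit c && (PySem.Chars.strIsdigit st.2 || st.2 == []) then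
    (st.1, st.2 ++ [c])
  else if PySem.Chars.isalpha c && (PySem.Chars.strIsalpha st.2 || st.2 == []) then
    (st.1, st.2 ++ [c])
  else if !PySem.Chars.isalpha c && !PySem.Chars.isdigit c then
    ((if st.2 ≠ [] then st.1 ++ [String.ofList st.2] else st.1) ++ [String.ofList [c]], [])
  else
    (st.1 ++ [String.ofList st.2], [c])

def tokenize (str : String) : List String :=
  let r := str.toList.foldl tokAStep ([], [])
  if r.2 ≠ [] then r.1 ++ [String.ofList r.2] else r.1

-- ===== PORT B =====
-- B's _kind helper: 0 = other, 1 = digit, 2 = letter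
def tokKind (c : Char) : Nat :=
  if PySem.Chars.isdigit c then 1 else if PySem.Chars.isalpha c then 2 else 0

-- B's inner 'while j < n and _kind(str[j]) == k' loop: length of the leading run of kind k
def runEnd (k : Nat) : List Char → Nat
  | [] => 0
  | c :: rest => if tokKind c == k then 1 + runEnd k rest else 0

-- B's outer 'while i < n' loop; the slice str[i:j] is (c :: rest.take r)
def tokB : List Char → List String
  | [] => []
  | c :: rest =>
    let k := tokKind c
    if k = 0 then String.ofList [c] :: tokB rest
    else
      let r := runEnd k rest
      String.ofList (c :: rest.take r) :: tokB (rest.drop r)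
termination_by cs => cs.length
decreasing_by
  · simp
  · simp only [List.length_cons]
    have : (rest.drop (runEnd (tokKind c) rest)).length ≤ rest.length := by
      simp [List.length_drop]
    omega

def tokenize_alt (str : String) : List String := tokB str.toList

-- ===== PRECONDITION & SPEC =====
def Spec_tokenize (str : String) (out : List String) : Prop := out = tokenize_alt str
instance (str : String) (out : List String) : Decidable (Spec_tokenize str out) := by unfold Spec_tokenize; infer_instance

-- ===== CLAIM =====
def Claim_equal_tokenize : Prop := ∀ (str : String), Dom_tokenize str → Spec_tokenize str (tokenize str)

-- ===== LEMMAS AND PROOFS =====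

-- finish of A's loop state (the trailing 'if current_token != ""')
def tokFinish (st : List String × List Char) : List String :=
  if st.2 ≠ [] then st.1 ++ [String.ofList st.2] else st.1

-- what A will still emit from state (cur of kind k) followed by cs
def emitB (cur : List Char) (k : Nat) (cs : List Char) : List String :=
  if cur = [] then tokB cs
  else
    let r := runEnd k cs
    String.ofList (cur ++ cs.take r) :: tokB (cs.drop r)

-- invariant on A's state tied to a kind flag
def tokInvK (cur : List Char) (k : Nat) : Prop :=
  cur = [] ∨
  (k = 1 ∧ cur ≠ [] ∧ PySem.Chars.strIsdigit cur = true) ∨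
  (k = 2 ∧ cur ≠ [] ∧ PySem.Chars.strIsalpha cur = true)

theorem isdigit_not_isalpha (c : Char) (h : PySem.Chars.isdigit c = true) :
    PySem.Chars.isalpha c = false := by
  simp [PySem.Chars.isdigit, Char.le_def, UInt32.le_iff_toNat_le] at h
  simp [PySem.Chars.isalpha, PySem.Chars.isupper, PySem.Chars.islower, Char.le_def, UInt32.le_iff_toNat_le]
  omega

theorem strIsdigit_not_alpha (cs : List Char) (h : PySem.Chars.strIsdigit cs = true) :
    PySem.Chars.strIsalpha cs = false := by
  cases cs with
  | nil => simp [PySem.Chars.strIsdigit] at h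
  | cons a l =>
    simp [PySem.Chars.strIsdigit] at h
    simp [PySem.Chars.strIsalpha, isdigit_not_isalpha a h.1]

theorem strIsalpha_not_digit (cs : List Char) (h : PySem.Chars.strIsalpha cs = true) :
    PySem.Chars.strIsdigit cs = false := by
  cases cs with
  | nil => simp [PySem.Chars.strIsalpha] at h
  | cons a l =>
    simp [PySem.Chars.strIsalpha] at h
    simp [PySem.Chars.strIsdigit]
    intro hd
    have := isdigit_not_isalpha a hd
    simp [h.1] at this

theorem strIsdigit_append (cs : List Char) (c : Char) (h : PySem.Chars.strIsdigit cs = true)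
    (hc : PySem.Chars.isdigit c = true) : PySem.Chars.strIsdigit (cs ++ [c]) = true := by
  simp [PySem.Chars.strIsdigit, List.all_append] at h ⊢
  exact ⟨h.2, hc⟩

theorem strIsalpha_append (cs : List Char) (c : Char) (h : PySem.Chars.strIsalpha cs = true)
    (hc : PySem.Chars.isalpha c = true) : PySem.Chars.strIsalpha (cs ++ [c]) = true := by
  simp [PySem.Chars.strIsalpha, List.all_append] at h ⊢
  exact ⟨h.2, hc⟩

-- main loop correspondence
theorem tokLoop_emit (cs : List Char) (toks : List String) (cur : List Char) (k : Nat)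
    (h : tokInvK cur k) :
    tokFinish (cs.foldl tokAStep (toks, cur)) = toks ++ emitB cur k cs := by
  induction cs generalizing toks cur k with
  | nil =>
    rcases h with hc | ⟨hk, hne, hd⟩ | ⟨hk, hne, ha⟩
    · subst hc; simp [tokFinish, emitB, tokB]
    · subst hk; simp [tokFinish, emitB, runEnd, tokB, hne]
    · subst hk; simp [tokFinish, emitB, runEnd, tokB, hne]
  | cons c rest ih =>
    rw [List.foldl_cons]
    rcases h with hc | ⟨hk, hne, hd⟩ | ⟨hk, hne, ha⟩
    · subst hc
      by_cases hdc : PySem.Chars.isdigit c = true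
      · have step : tokAStep (toks, []) c = (toks, [c]) := by simp [tokAStep, hdc]
        have hinv : tokInvK [c] 1 :=
          Or.inr (Or.inl ⟨rfl, by simp, by simp [PySem.Chars.strIsdigit, hdc]⟩)
        rw [step, ih _ _ _ hinv]
        simp [emitB, tokB, tokKind, hdc]
      · by_cases hac : PySem.Chars.isalpha c = true
        · have step : tokAStep (toks, []) c = (toks, [c]) := by simp [tokAStep, hdc, hac]
          have hinv : tokInvK [c] 2 :=
            Or.inr (Or.inr ⟨rfl, by simp, by simp [PySem.Chars.strIsalpha, hac]⟩)
          rw [step, ih _ _ _ hinv]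
          simp [emitB, tokB, tokKind, hdc, hac]
        · have step : tokAStep (toks, []) c = (toks ++ [String.ofList [c]], []) := by
            simp [tokAStep, hdc, hac]
          rw [step, ih _ _ 0 (Or.inl rfl)]
          simp [emitB, tokB, tokKind, hdc, hac]
    · subst hk
      by_cases hdc : PySem.Chars.isdigit c = true
      · have step : tokAStep (toks, cur) c = (toks, cur ++ [c]) := by
          simp [tokAStep, hdc, hd]
        have hinv : tokInvK (cur ++ [c]) 1 :=
          Or.inr (Or.inl ⟨rfl, by simp, strIsdigit_append cur c hd hdc⟩)
        rw [step, ih _ _ _ hinv]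
        simp [emitB, runEnd, tokKind, hdc, hne, Nat.add_comm 1]
      · by_cases hac : PySem.Chars.isalpha c = true
        · have step : tokAStep (toks, cur) c = (toks ++ [String.ofList cur], [c]) := by
            simp [tokAStep, hdc, hac, hne, strIsdigit_not_alpha cur hd]
          have hinv : tokInvK [c] 2 :=
            Or.inr (Or.inr ⟨rfl, by simp, by simp [PySem.Chars.strIsalpha, hac]⟩)
          rw [step, ih _ _ _ hinv]
          simp [emitB, runEnd, tokB, tokKind, hdc, hac, hne]
        · have step : tokAStep (toks, cur) c
              = ((toks ++ [String.ofList cur]) ++ [String.ofList [c]], []) := by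
            simp [tokAStep, hdc, hac, hne]
          rw [step, ih _ _ 0 (Or.inl rfl)]
          simp [emitB, runEnd, tokB, tokKind, hdc, hac, hne]
    · subst hk
      by_cases hdc : PySem.Chars.isdigit c = true
      · have step : tokAStep (toks, cur) c = (toks ++ [String.ofList cur], [c]) := by
          simp [tokAStep, hdc, hne, strIsalpha_not_digit cur ha, isdigit_not_isalpha c hdc]
        have hinv : tokInvK [c] 1 :=
          Or.inr (Or.inl ⟨rfl, by simp, by simp [PySem.Chars.strIsdigit, hdc]⟩)
        rw [step, ih _ _ _ hinv]
        simp [emitB, runEnd, tokB, tokKind, hdc, hne]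
      · by_cases hac : PySem.Chars.isalpha c = true
        · have step : tokAStep (toks, cur) c = (toks, cur ++ [c]) := by
            simp [tokAStep, hdc, hac, ha]
          have hinv : tokInvK (cur ++ [c]) 2 :=
            Or.inr (Or.inr ⟨rfl, by simp, strIsalpha_append cur c ha hac⟩)
          rw [step, ih _ _ _ hinv]
          simp [emitB, runEnd, tokKind, hdc, hac, hne, Nat.add_comm 1]
        · have step : tokAStep (toks, cur) c
              = ((toks ++ [String.ofList cur]) ++ [String.ofList [c]], []) := by
            simp [tokAStep, hdc, hac, hne]
          rw [step, ih _ _ 0 (Or.inl rfl)]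
          simp [emitB, runEnd, tokB, tokKind, hdc, hac, hne]

-- ===== VERDICT =====
theorem tokenize_spec : Claim_equal_tokenize := by
  intro str _
  unfold Spec_tokenize tokenize tokenize_alt
  have := tokLoop_emit str.toList [] [] 0 (Or.inl rfl)
  simpa [tokFinish, emitB] using this
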